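-- pv_equiv track=rewrite | github.com/LilianaSP/Courses | Facebook coding practice/Encrypted_words.py | findEncryptedWord
-- ===== SOURCE A (Python) =====
-- def findEncryptedWord(s):
--   # Write your code here
--   if s == '': #empty string
--     return s
--   if len(s) % 2 ==1: #odd
--      m = int((len(s) -1)/2)
--   else:
--      m = int(len(s)/2 -1) #index
--
--   return s[m] + findEncryptedWord(s[:m]) + findEncryptedWord(s[m+1:])
-- ===== SOURCE B (Python) =====
-- def findEncryptedWord(s):
--     # Iterative rewrite: explicit stack of (lo, hi) index ranges, preorder
--     # (middle, left, right); (hi-lo-1)//2 is the unified odd/even middle offset.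
--     if s == '':
--         return s
--     res = []
--     stack = [(0, len(s))]
--     while stack:
--         lo, hi = stack.pop()
--         if lo >= hi:
--             continue
--         m = lo + (hi - lo - 1) // 2
--         res.append(s[m])
--         stack.append((m + 1, hi))
--         stack.append((lo, m))
--     return ''.join(res)
-- ===== Notes on version B (the rewrite author's own statement) =====
-- stated objective: alternative
-- what changed: Replaced the string-slicing recursion by an iterative loop over an explicit stack of (lo,hi) index ranges with a single unified middle formula lo+(hi-lo-1)//2, appending characters to a list and joining once instead of building strings by recursive concatenation.
import Mathlib
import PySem

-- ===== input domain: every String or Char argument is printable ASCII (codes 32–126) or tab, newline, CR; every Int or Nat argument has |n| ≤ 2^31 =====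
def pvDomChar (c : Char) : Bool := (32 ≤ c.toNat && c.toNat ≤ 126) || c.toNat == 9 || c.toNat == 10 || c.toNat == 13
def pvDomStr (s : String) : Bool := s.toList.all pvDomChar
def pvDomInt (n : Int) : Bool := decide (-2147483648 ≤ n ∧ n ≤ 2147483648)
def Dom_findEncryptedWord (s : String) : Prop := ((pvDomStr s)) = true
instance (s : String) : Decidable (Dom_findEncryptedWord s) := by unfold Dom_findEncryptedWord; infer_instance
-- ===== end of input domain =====

-- B replaces A's string-slicing recursion by an iterative loop over an explicit
-- stack of (lo,hi) index ranges (alternative decomposition, same result).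

-- ===== PORT A =====
-- A's recursion on the character list: empty check, the odd/even middle index
-- (both branches compute on nonnegative ints, written out as in A), then
-- s[m] ++ recurse on s[:m] (= take m) ++ recurse on s[m+1:] (= drop (m+1)).
-- The fuel argument is only a totality guard: each recursive call strictly
-- shrinks the list, so fuel = length never runs out.
def goA : Nat → List Char → List Char
  | 0, _ => []
  | fuel + 1, l =>
    if l = [] then []
    else
      let m : Nat := if l.length % 2 = 1 then (l.length - 1) / 2 else l.length / 2 - 1
      l.getD m default :: (goA fuel (l.take m) ++ goA fuel (l.drop (m + 1)))

def findEncryptedWord (s : String) : String :=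
  if s = "" then s else String.ofList (goA s.toList.length s.toList)

-- ===== PORT B =====
-- B's while loop: pop a (lo,hi) range, skip if empty, emit s[m], push right
-- then left range.  Python's stack top (list end) is the head here.  The fuel
-- is only a totality guard: the loop runs at most 2*len+1 iterations.
def goB : Nat → List Char → List (Nat × Nat) → List Char → List Char
  | 0, _, _, acc => acc
  | fuel + 1, s, st, acc =>
    match st with
    | [] => acc
    | (lo, hi) :: rest =>
      if lo ≥ hi then goB fuel s rest acc
      else
        let m := lo + (hi - lo - 1) / 2
        goB fuel s ((lo, m) :: (m + 1, hi) :: rest) (acc ++ [s.getD m default])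

def findEncryptedWord_alt (s : String) : String :=
  if s = "" then s
  else String.ofList (goB (2 * s.toList.length + 1) s.toList [(0, s.toList.length)] [])

-- ===== PRECONDITION & SPEC =====
def Spec_findEncryptedWord (s : String) (out : String) : Prop := out = findEncryptedWord_alt s
instance (s : String) (out : String) : Decidable (Spec_findEncryptedWord s out) := by unfold Spec_findEncryptedWord; infer_instance

-- ===== CLAIM (what is proved, stated in full; the proofs are below) =====
def Claim_equal_findEncryptedWord : Prop := ∀ (s : String), Dom_findEncryptedWord s → Spec_findEncryptedWord s (findEncryptedWord s)

-- ===== LEMMAS AND PROOFS =====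

theorem goA_nil (f : Nat) : goA f [] = [] := by cases f <;> simp [goA]

-- A's two middle-index branches both compute (len-1)/2.
theorem goA_cons_eq (f : Nat) (l : List Char) (h : l ≠ []) :
    goA (f + 1) l = l.getD ((l.length - 1) / 2) default ::
      (goA f (l.take ((l.length - 1) / 2)) ++ goA f (l.drop ((l.length - 1) / 2 + 1))) := by
  have hl : 0 < l.length := List.length_pos_iff.mpr h
  have hm : (if l.length % 2 = 1 then (l.length - 1) / 2 else l.length / 2 - 1)
      = (l.length - 1) / 2 := by split <;> omega
  simp [goA, h, hm]

-- any sufficient fuel computes the same value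
theorem goA_irrel : ∀ (f g : Nat) (l : List Char), l.length ≤ f → l.length ≤ g →
    goA f l = goA g l := by
  intro f
  induction f with
  | zero =>
    intro g l hf _
    have : l = [] := List.eq_nil_of_length_eq_zero (by omega)
    rw [this, goA_nil, goA_nil]
  | succ f ih =>
    intro g l hf hg
    by_cases h : l = []
    · rw [h, goA_nil, goA_nil]
    · have hl : 0 < l.length := List.length_pos_iff.mpr h
      cases g with
      | zero => omega
      | succ g =>
        have hm : (l.length - 1) / 2 < l.length := by omega
        rw [goA_cons_eq f l h, goA_cons_eq g l h,
          ih g (l.take ((l.length - 1) / 2))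
            (by simp only [List.length_take]; omega) (by simp only [List.length_take]; omega),
          ih g (l.drop ((l.length - 1) / 2 + 1))
            (by simp only [List.length_drop]; omega) (by simp only [List.length_drop]; omega)]

-- Key invariant: processing the top range (lo,hi) consumes exactly 2*(hi-lo)+1
-- fuel and appends exactly A's result on the segment s[lo:hi].
theorem goB_seg : ∀ (fuel : Nat) (s : List Char) (lo hi : Nat) (rest : List (Nat × Nat))
    (acc : List Char), 2 * (hi - lo) + 1 ≤ fuel → hi ≤ s.length →
    goB fuel s ((lo, hi) :: rest) acc
      = goB (fuel - (2 * (hi - lo) + 1)) s rest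
          (acc ++ goA (hi - lo) ((s.drop lo).take (hi - lo))) := by
  intro fuel
  induction fuel using Nat.strong_induction_on with
  | _ fuel ih =>
    intro s lo hi rest acc hf hhi
    obtain ⟨f, rfl⟩ : ∃ f, fuel = f + 1 := ⟨fuel - 1, by omega⟩
    by_cases hle : lo ≥ hi
    · have h0 : hi - lo = 0 := by omega
      simp [goB, hle, h0, goA]
    · have hlt : lo < hi := by omega
      set L := hi - lo with hL
      obtain ⟨L', hL'⟩ : ∃ L', L = L' + 1 := ⟨L - 1, by omega⟩
      set m' := (L - 1) / 2 with hm'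
      have hm'L : m' < L := by omega
      set A := s.drop lo with hA
      have hAlen : A.length = s.length - lo := by simp [hA]
      have hseglen : (A.take L).length = L := by simp [hAlen]; omega
      have hsegne : A.take L ≠ [] := by
        intro hc; rw [hc] at hseglen; simp at hseglen; omega
      -- one loop step
      have hstep : goB (f + 1) s ((lo, hi) :: rest) acc
          = goB f s ((lo, lo + m') :: (lo + m' + 1, hi) :: rest)
              (acc ++ [s.getD (lo + m') default]) := by
        have hmeq : lo + (hi - lo - 1) / 2 = lo + m' := by simp [hm', hL]
        simp [goB, hle, hmeq]
      rw [hstep,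
        ih f (by omega) s lo (lo + m') _ _ (by omega) (by omega),
        ih (f - (2 * ((lo + m') - lo) + 1)) (by omega) s (lo + m' + 1) hi _ _ (by omega) hhi]
      -- the emitted pieces equal one unfolding of A on the segment
      have hgoA := goA_cons_eq L' (A.take L) hsegne
      rw [hseglen, ← hm', ← hL'] at hgoA
      have htake : (A.take L).take m' = A.take m' := by
        rw [List.take_take]; congr 1; omega
      have hdrop : (A.take L).drop (m' + 1) = (s.drop (lo + (m' + 1))).take (L - (m' + 1)) := by
        rw [List.drop_take, List.drop_drop]
      have hget : (A.take L).getD m' default = s.getD (lo + m') default := by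
        have h1 : m' < (A.take L).length := by omega
        have h2 : lo + m' < s.length := by omega
        rw [List.getD_eq_getElem _ _ h1, List.getD_eq_getElem _ _ h2, List.getElem_take]
        simp [hA, List.getElem_drop]
      have e1 : goA ((lo + m') - lo) ((s.drop lo).take ((lo + m') - lo))
          = goA L' ((A.take L).take m') := by
        rw [htake]
        have : (lo + m') - lo = m' := by omega
        rw [this, ← hA]
        exact goA_irrel m' L' (A.take m')
          (by simp only [List.length_take]; omega) (by simp only [List.length_take, hAlen]; omega)
      have e2 : goA (hi - (lo + m' + 1)) ((s.drop (lo + m' + 1)).take (hi - (lo + m' + 1)))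
          = goA L' ((A.take L).drop (m' + 1)) := by
        rw [hdrop]
        have ha : lo + (m' + 1) = lo + m' + 1 := by omega
        have hb : hi - (lo + m' + 1) = L - (m' + 1) := by omega
        rw [ha, hb]
        exact goA_irrel (L - (m' + 1)) L' _
          (by simp only [List.length_take, List.length_drop]; omega)
          (by simp only [List.length_take, List.length_drop]; omega)
      rw [e1, e2, hgoA, hget]
      have hfuel : f - (2 * ((lo + m') - lo) + 1) - (2 * (hi - (lo + m' + 1)) + 1)
          = f + 1 - (2 * L + 1) := by omega
      rw [hfuel]
      simp

-- ===== VERDICT (by name: the statement is the Claim_ definition above) =====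
theorem findEncryptedWord_spec : Claim_equal_findEncryptedWord := by
  intro s _
  unfold Spec_findEncryptedWord findEncryptedWord findEncryptedWord_alt
  by_cases h : s = ""
  · simp [h]
  · simp only [h, if_false]
    rw [goB_seg (2 * s.toList.length + 1) s.toList 0 s.toList.length [] [] (by omega) le_rfl]
    simp only [Nat.sub_zero, List.drop_zero, List.take_length, List.nil_append]
    rw [Nat.sub_self]
    rfl
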